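-- pv_equiv track=rewrite | github.com/Ravish-kum/Crash_Detections_yolov5 | car_detections/centroidtracker.py | crashed_car_by_no_motion
-- ===== SOURCE A (Python) =====
-- def crashed_car_by_no_motion(operational_tracking,object_id):   # level third alert
--     error_estimation = 0
--     for i in range(len(operational_tracking)-1):
--         if  operational_tracking[i] == operational_tracking[i+1]:
--             error_estimation += 1
--         else:
--             continue
--
--     if error_estimation > 5 :
--         return "Level 3 Alert: Car Crash",object_id
-- ===== SOURCE B (Python) =====
-- from itertools import groupby
--
-- def crashed_car_by_no_motion(operational_tracking, object_id):   # level third alert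
--     # adjacent-equal pairs = total length minus number of runs of equal elements
--     n = len(operational_tracking)
--     g = sum(1 for _ in groupby(operational_tracking))
--     error_estimation = n - g
--     if error_estimation > 5:
--         return "Level 3 Alert: Car Crash", object_id
-- ===== Notes on version B (the rewrite author's own statement) =====
-- stated objective: alternative
-- what changed: Replaces A's pairwise index scan (comparing xs[i] with xs[i+1] over range(len-1)) by grouping the list into runs of consecutive equal elements with itertools.groupby and computing the adjacent-equal count as len(xs) minus the number of runs.
import Mathlib
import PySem

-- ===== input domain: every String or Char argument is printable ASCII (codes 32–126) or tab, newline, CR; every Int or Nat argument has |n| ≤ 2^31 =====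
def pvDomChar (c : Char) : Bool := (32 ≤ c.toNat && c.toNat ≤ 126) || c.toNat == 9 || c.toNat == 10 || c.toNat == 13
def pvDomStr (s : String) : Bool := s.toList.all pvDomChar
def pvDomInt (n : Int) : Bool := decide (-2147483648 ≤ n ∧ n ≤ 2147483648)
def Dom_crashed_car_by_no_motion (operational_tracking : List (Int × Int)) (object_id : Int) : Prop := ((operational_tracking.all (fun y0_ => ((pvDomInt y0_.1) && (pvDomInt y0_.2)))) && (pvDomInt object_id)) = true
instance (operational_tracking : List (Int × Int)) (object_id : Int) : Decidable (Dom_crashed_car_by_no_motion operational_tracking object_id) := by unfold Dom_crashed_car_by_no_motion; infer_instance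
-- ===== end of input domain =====

-- B replaces A's index-pairwise adjacent scan with a run-count decomposition (adjacent-equal pairs = length − number of runs); objective: alternative, same cost.

-- ===== PORT A =====
-- literal port of A: loop over range(len-1), compare xs[i] with xs[i+1], count, then threshold test
def crashed_car_by_no_motion (operational_tracking : List (Int × Int)) (object_id : Int) : Option (String × Int) :=
  let error_estimation := (PySem.List.pyRange 0 ((operational_tracking.length : Int) - 1) 1).foldl
    (fun acc i => if PySem.List.pyGet? operational_tracking i = PySem.List.pyGet? operational_tracking (i + 1) then acc + 1 else acc) (0 : Int)
  if error_estimation > 5 then some ("Level 3 Alert: Car Crash", object_id) else none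

-- ===== PORT B =====
-- B-side helper: number of runs of consecutive equal elements (itertools.groupby group count)
def pvRunCount : List (Int × Int) → Nat
  | [] => 0
  | [_] => 1
  | a :: b :: t => (if a = b then 0 else 1) + pvRunCount (b :: t)

def crashed_car_by_no_motion_alt (operational_tracking : List (Int × Int)) (object_id : Int) : Option (String × Int) :=
  let error_estimation : Int := (operational_tracking.length : Int) - (pvRunCount operational_tracking : Int)
  if error_estimation > 5 then some ("Level 3 Alert: Car Crash", object_id) else none

-- ===== PRECONDITION & SPEC =====
def Spec_crashed_car_by_no_motion (operational_tracking : List (Int × Int)) (object_id : Int) (out : Option (String × Int)) : Prop := out = crashed_car_by_no_motion_alt operational_tracking object_id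
instance (operational_tracking : List (Int × Int)) (object_id : Int) (out : Option (String × Int)) : Decidable (Spec_crashed_car_by_no_motion operational_tracking object_id out) := by unfold Spec_crashed_car_by_no_motion; infer_instance

-- ===== CLAIM (what is proved, stated in full; the proofs are below) =====
def Claim_equal_crashed_car_by_no_motion : Prop := ∀ (operational_tracking : List (Int × Int)) (object_id : Int), Dom_crashed_car_by_no_motion operational_tracking object_id → Spec_crashed_car_by_no_motion operational_tracking object_id (crashed_car_by_no_motion operational_tracking object_id)

-- ===== LEMMAS AND PROOFS =====
-- proof helper: the number of adjacent equal pairs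
def pvAdj : List (Int × Int) → Nat
  | [] => 0
  | [_] => 0
  | a :: b :: t => (if a = b then 1 else 0) + pvAdj (b :: t)

lemma runCount_adj : ∀ xs : List (Int × Int), pvRunCount xs + pvAdj xs = xs.length := by
  intro xs
  induction xs using pvRunCount.induct with
  | case1 => simp [pvRunCount, pvAdj]
  | case2 a => simp [pvRunCount, pvAdj]
  | case3 a b t ih =>
    simp only [pvRunCount, pvAdj, List.length_cons] at *
    split <;> omega

lemma cnt_core : ∀ (xs : List (Int × Int)),
    List.countP (fun k : Nat => decide ((xs[k]? : Option (Int × Int)) = xs[(k+1)]?)) (List.range (xs.length - 1)) = pvAdj xs := by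
  intro xs
  induction xs using pvAdj.induct with
  | case1 => simp [pvAdj]
  | case2 a => simp [pvAdj]
  | case3 a b t ih =>
    have hl : (a :: b :: t).length - 1 = t.length + 1 := by simp
    rw [hl, List.range_succ_eq_map, List.countP_cons, List.countP_map]
    have hfun : List.countP ((fun k : Nat => decide (((a::b::t)[k]? : Option (Int × Int)) = (a::b::t)[k+1]?)) ∘ Nat.succ) (List.range t.length)
        = List.countP (fun k : Nat => decide (((b::t)[k]? : Option (Int × Int)) = (b::t)[k+1]?)) (List.range t.length) := by
      apply List.countP_congr; intro k _; simp [Function.comp]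
    have hl2 : (b :: t).length - 1 = t.length := by simp
    rw [hl2] at ih
    rw [hfun, ih]
    simp only [pvAdj]
    by_cases hab : a = b
    · simp [hab]; omega
    · simp [hab]

lemma foldA_eq (xs : List (Int × Int)) :
    (PySem.List.pyRange 0 ((xs.length : Int) - 1) 1).foldl
      (fun acc i => if PySem.List.pyGet? xs i = PySem.List.pyGet? xs (i + 1) then acc + 1 else acc) (0 : Int)
    = (pvAdj xs : Int) := by
  rw [PySem.List.pyRange_one]
  have hb : (fun (acc : Int) i => if PySem.List.pyGet? xs i = PySem.List.pyGet? xs (i + 1) then acc + 1 else acc)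
      = (fun (acc : Int) i => if (decide (PySem.List.pyGet? xs i = PySem.List.pyGet? xs (i + 1))) = true then acc + 1 else acc) := by
    funext acc i; simp
  rw [hb, PySem.List.foldl_count_if]
  rw [List.countP_map]
  have h1 : ((xs.length : Int) - 1 - 0).toNat = xs.length - 1 := by omega
  rw [h1]
  have h2 : List.countP ((fun i => decide (PySem.List.pyGet? xs i = PySem.List.pyGet? xs (i + 1))) ∘ fun k : Nat => (0:Int) + k) (List.range (xs.length - 1))
      = List.countP (fun k : Nat => decide ((xs[k]? : Option (Int × Int)) = xs[(k+1)]?)) (List.range (xs.length - 1)) := by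
    apply List.countP_congr; intro k _
    simp only [Function.comp, zero_add]
    rw [show ((k:Int) + 1) = ((k+1:Nat):Int) by push_cast; ring]
    simp [PySem.List.pyGet?_natCast]
    norm_cast
    rw [PySem.List.pyGet?_natCast]
  rw [h2, cnt_core]
  omega

-- ===== VERDICT (by name: the statement is the Claim_ definition above) =====
theorem crashed_car_by_no_motion_spec : Claim_equal_crashed_car_by_no_motion := by
  intro xs object_id _
  unfold Spec_crashed_car_by_no_motion crashed_car_by_no_motion crashed_car_by_no_motion_alt
  rw [foldA_eq]
  have h := runCount_adj xs
  have he : (xs.length : Int) - (pvRunCount xs : Int) = (pvAdj xs : Int) := by omega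
  rw [he]
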